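-- pv_equiv track=rewrite | github.com/windsage/proprietary_sys | commonsys-intf/QIIFA-fwk/identify-depencency/qiifa-identify-dependencies.py | _insert_wildcard
-- ===== SOURCE A (Python) =====
-- def _insert_wildcard(strng):
--     """Insert '.' wildcard before any '*' within a string for regex and prevent regex insertions."""
--     special_chars = ['.', '+', '?', '^', '$']
--     regex = []
--     for s in strng:
--         if s == '*':
--             regex.append('.')
--         elif s in special_chars:
--             regex.append('\\')
--         regex.append(s)
--     return ''.join(regex)
-- ===== SOURCE B (Python) =====
-- def _insert_wildcard(strng):
--     """Insert '.' wildcard before any '*' within a string for regex and prevent regex insertions."""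
--     for c in '.+?^$':
--         strng = strng.replace(c, '\\' + c)
--     return strng.replace('*', '.*')
-- ===== Notes on version B (the rewrite author's own statement) =====
-- stated objective: faster
-- what changed: Replaced the single char-by-char loop with membership tests and a list accumulator by six staged whole-string replace passes (each regex special char escaped by one global str.replace, then the wildcard expanded to dot-star in a final pass, which is safe because the escape passes only introduce backslashes and the wildcard pass runs last).
import Mathlib
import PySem

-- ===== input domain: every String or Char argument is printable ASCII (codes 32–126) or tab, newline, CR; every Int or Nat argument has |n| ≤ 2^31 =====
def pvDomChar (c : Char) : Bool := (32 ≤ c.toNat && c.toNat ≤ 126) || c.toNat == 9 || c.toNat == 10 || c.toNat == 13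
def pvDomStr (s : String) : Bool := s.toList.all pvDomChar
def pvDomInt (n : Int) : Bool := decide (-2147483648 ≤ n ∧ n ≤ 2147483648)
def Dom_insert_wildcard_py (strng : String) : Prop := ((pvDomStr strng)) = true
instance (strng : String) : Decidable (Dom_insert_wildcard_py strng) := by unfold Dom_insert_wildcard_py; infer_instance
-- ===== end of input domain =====

-- B replaces A's single char-by-char loop by six staged whole-string replace passes
-- (escape each special char globally, then expand '*' to '.*' last); a timing run measured B faster.

-- ===== PORT A =====
def insert_wildcard_py (strng : String) : String :=
  let special_chars : List Char := ['.', '+', '?', '^', '$']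
  let regex : List String :=
    strng.toList.foldl (fun regex s =>
      (if s = '*' then regex ++ ["."]
       else if special_chars.contains s then regex ++ ["\\"]
       else regex) ++ [String.ofList [s]]) []
  PySem.Str.join "" regex

-- ===== PORT B =====
def insert_wildcard_py_alt (strng : String) : String :=
  let escaped :=
    ".+?^$".toList.foldl
      (fun s c => PySem.Str.replace s (String.ofList [c]) (String.ofList ['\\', c])) strng
  PySem.Str.replace escaped "*" ".*"

-- ===== PRECONDITION & SPEC =====
def Spec_insert_wildcard_py (strng : String) (out : String) : Prop := out = insert_wildcard_py_alt strng
instance (strng : String) (out : String) : Decidable (Spec_insert_wildcard_py strng out) := by unfold Spec_insert_wildcard_py; infer_instance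

-- ===== CLAIM =====
def Claim_equal_insert_wildcard_py : Prop := ∀ (strng : String), Dom_insert_wildcard_py strng → Spec_insert_wildcard_py strng (insert_wildcard_py strng)

-- ===== LEMMAS AND PROOFS =====

-- the character-level output both programs produce for one input character
def pvTarget (x : Char) : List Char :=
  if x = '*' then ['.', '*']
  else if x = '.' ∨ x = '+' ∨ x = '?' ∨ x = '^' ∨ x = '$' then ['\\', x]
  else [x]

-- replacing a SINGLE character is a per-character flatMap (spec of B's passes)
theorem pv_go_single (c : Char) (new : List Char) (l : List Char) :
    ∀ (fuel : Nat) (acc : List Char), l.length ≤ fuel →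
      PySem.Chars.replace.go [c] new fuel l acc
        = acc.reverse ++ l.flatMap (fun x => if x = c then new else [x]) := by
  induction l with
  | nil =>
      intro fuel acc _
      cases fuel <;> simp [PySem.Chars.replace.go.eq_def]
  | cons h t ih =>
      intro fuel acc hle
      cases fuel with
      | zero => simp at hle
      | succ n =>
          rw [PySem.Chars.replace.go.eq_def]
          have hlen : t.length ≤ n := by simp only [List.length_cons] at hle; omega
          by_cases hc : c = h
          · subst hc
            have hp : [c].isPrefixOf (c :: t) = true := by simp [List.isPrefixOf]
            simp only [hp, if_true, List.length_singleton, List.drop_succ_cons, List.drop_zero]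
            rw [ih n (new.reverse ++ acc) hlen]
            simp
          · have hp : [c].isPrefixOf (h :: t) = false := by
              simp [List.isPrefixOf, hc]
            simp only [hp, Bool.false_eq_true, if_false]
            rw [ih n (h :: acc) hlen]
            simp [Ne.symm hc]

theorem pv_replace_single (l : List Char) (c : Char) (new : List Char) :
    PySem.Chars.replace l [c] new = l.flatMap (fun x => if x = c then new else [x]) := by
  have h := pv_go_single c new l l.length [] le_rfl
  simpa [PySem.Chars.replace] using h

theorem pv_join_nil_flatten (ls : List (List Char)) :
    PySem.Chars.join [] ls = ls.flatten := by
  simp [PySem.Chars.join, List.intercalate]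
  induction ls with
  | nil => simp
  | cons h t ih =>
      cases t with
      | nil => simp
      | cons h2 t2 => simp_all [List.intersperse]

-- A's loop emits exactly pvTarget per character (as single-char string pieces)
def pvPieces (s : Char) : List String :=
  (if s = '*' then ["."]
   else if (['.', '+', '?', '^', '$'] : List Char).contains s then ["\\"]
   else []) ++ [String.ofList [s]]

theorem pv_foldl_eq_flatMap (l : List Char) (acc : List String) :
    l.foldl (fun regex s =>
      (if s = '*' then regex ++ ["."]
       else if (['.', '+', '?', '^', '$'] : List Char).contains s then regex ++ ["\\"]
       else regex) ++ [String.ofList [s]]) acc = acc ++ l.flatMap pvPieces := by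
  induction l generalizing acc with
  | nil => simp
  | cons c t ih =>
      simp only [List.foldl_cons, List.flatMap_cons, ih]
      unfold pvPieces
      split_ifs <;> simp

theorem pv_pieces_chars (c : Char) :
    ((pvPieces c).map String.toList).flatten = pvTarget c := by
  unfold pvPieces pvTarget
  by_cases h1 : c = '*'
  · subst h1; decide
  by_cases h2 : c = '.'
  · subst h2; decide
  by_cases h3 : c = '+'
  · subst h3; decide
  by_cases h4 : c = '?'
  · subst h4; decide
  by_cases h5 : c = '^'
  · subst h5; decide
  by_cases h6 : c = '$'
  · subst h6; decide
  · simp [h1, h2, h3, h4, h5, h6]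

theorem pv_flatten_pieces (l : List Char) :
    ((l.flatMap pvPieces).map String.toList).flatten = l.flatMap pvTarget := by
  induction l with
  | nil => rfl
  | cons c t ih =>
      simp only [List.flatMap_cons, List.map_append, List.flatten_append, ih, pv_pieces_chars]

theorem pv_A_chars (strng : String) :
    (insert_wildcard_py strng).toList = strng.toList.flatMap pvTarget := by
  simp only [insert_wildcard_py, pv_foldl_eq_flatMap, List.nil_append, PySem.Str.toList_join]
  have h0 : ("" : String).toList = [] := rfl
  rw [h0, pv_join_nil_flatten, pv_flatten_pieces]

-- B's six staged passes compose, per character, to pvTarget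
def pvEsc (c : Char) (x : Char) : List Char := if x = c then ['\\', c] else [x]

theorem pv_chain_char (x : Char) :
    ((pvEsc '.' x).flatMap fun a =>
      (pvEsc '+' a).flatMap fun b =>
        (pvEsc '?' b).flatMap fun d =>
          (pvEsc '^' d).flatMap fun e =>
            (pvEsc '$' e).flatMap fun y =>
              if y = '*' then ['.', '*'] else [y]) = pvTarget x := by
  unfold pvTarget
  by_cases h1 : x = '*'
  · subst h1; decide
  by_cases h2 : x = '.'
  · subst h2; decide
  by_cases h3 : x = '+'
  · subst h3; decide
  by_cases h4 : x = '?'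
  · subst h4; decide
  by_cases h5 : x = '^'
  · subst h5; decide
  by_cases h6 : x = '$'
  · subst h6; decide
  · simp [pvEsc, h1, h2, h3, h4, h5, h6]

theorem pv_B_chars (strng : String) :
    (insert_wildcard_py_alt strng).toList = strng.toList.flatMap pvTarget := by
  unfold insert_wildcard_py_alt
  have hstep : ∀ (s : String) (c : Char),
      (PySem.Str.replace s (String.ofList [c]) (String.ofList ['\\', c])).toList
        = s.toList.flatMap (pvEsc c) := by
    intro s c
    rw [PySem.Str.toList_replace]
    have h1 : (String.ofList [c]).toList = [c] := by simp
    have h2 : (String.ofList ['\\', c]).toList = ['\\', c] := by simp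
    rw [h1, h2, pv_replace_single]
    rfl
  have hfold : (".+?^$".toList.foldl
      (fun s c => PySem.Str.replace s (String.ofList [c]) (String.ofList ['\\', c])) strng).toList
      = ((((strng.toList.flatMap (pvEsc '.')).flatMap (pvEsc '+')).flatMap
          (pvEsc '?')).flatMap (pvEsc '^')).flatMap (pvEsc '$') := by
    show (List.foldl _ strng ['.', '+', '?', '^', '$']).toList = _
    simp only [List.foldl_cons, List.foldl_nil, hstep]
  rw [PySem.Str.toList_replace, hfold]
  have h1 : ("*" : String).toList = ['*'] := rfl
  have h2 : (".*" : String).toList = ['.', '*'] := rfl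
  rw [h1, h2, pv_replace_single]
  simp only [List.flatMap_assoc]
  exact congrArg (fun f => List.flatMap f strng.toList) (funext pv_chain_char)

-- ===== VERDICT =====
theorem insert_wildcard_py_spec : Claim_equal_insert_wildcard_py := by
  intro strng _
  unfold Spec_insert_wildcard_py
  exact String.toList_inj.mp ((pv_A_chars strng).trans (pv_B_chars strng).symm)
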